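-- pv_equiv track=rewrite | github.com/tobstern/AOC2024_py | days/day20.py | find_cheat_savings2
-- ===== SOURCE A (Python) =====
-- def find_cheat_savings2(grid, dist, S, E, rmax, cmax):
--
--     # Find all possible positions that can be "cheated" through (walls).
--     count = 0
--     for r in range(rmax):
--         for c in range(cmax):
--             if grid[r][c] == "#":
--                 continue
--
--             # just look in "one direction" - from upper left perspective, thereby you check every possible one
--             for radius in range(2, 21):
--                 for dr in range(radius + 1):
--                     dc = radius - dr
--                     for nr, nc in {
--                         (r + dr, c + dc),
--                         (r + dr, c - dc),
--                         (r - dr, c + dc),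
--                         (r - dr, c - dc),
--                     }:
--
--                         if nr < 0 or nr >= rmax or nc < 0 or nc >= cmax:
--                             continue
--                         if grid[nr][nc] == "#":
--                             # do not hit the wall
--                             continue
--
--                         if dist[r][c] - dist[nr][nc] >= 100 + radius:
--                             # check all radii that save 20 ps
--                             count += 1
--
--     return count
-- ===== SOURCE B (Python) =====
-- def find_cheat_savings2(grid, dist, S, E, rmax, cmax):
--     # Collect every open cell with its distance once, then count qualifying
--     # ordered pairs of open cells directly -- no offset/radius enumeration.
--     cells = [(r, c, dist[r][c])
--              for r in range(rmax)
--              for c in range(cmax)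
--              if grid[r][c] != "#"]
--     count = 0
--     for r, c, d1 in cells:
--         for nr, nc, d2 in cells:
--             radius = abs(r - nr) + abs(c - nc)
--             if 2 <= radius <= 20 and d1 - d2 >= 100 + radius:
--                 count += 1
--     return count
-- ===== Notes on version B (the rewrite author's own statement) =====
-- stated objective: alternative
-- what changed: Replaces A's per-cell radius-shell offset enumeration (dc = radius - dr plus a 4-element reflection dedup set, with bounds and wall checks per offset) by collecting all open cells with their distances once and counting qualifying ordered pairs of open cells directly via their Manhattan distance.
-- outside the precondition, e.g. on find_cheat_savings2([['.']], [], (0, 0), (0, 0), 1, 1): A returns 0, B raises IndexError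
import Mathlib
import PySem

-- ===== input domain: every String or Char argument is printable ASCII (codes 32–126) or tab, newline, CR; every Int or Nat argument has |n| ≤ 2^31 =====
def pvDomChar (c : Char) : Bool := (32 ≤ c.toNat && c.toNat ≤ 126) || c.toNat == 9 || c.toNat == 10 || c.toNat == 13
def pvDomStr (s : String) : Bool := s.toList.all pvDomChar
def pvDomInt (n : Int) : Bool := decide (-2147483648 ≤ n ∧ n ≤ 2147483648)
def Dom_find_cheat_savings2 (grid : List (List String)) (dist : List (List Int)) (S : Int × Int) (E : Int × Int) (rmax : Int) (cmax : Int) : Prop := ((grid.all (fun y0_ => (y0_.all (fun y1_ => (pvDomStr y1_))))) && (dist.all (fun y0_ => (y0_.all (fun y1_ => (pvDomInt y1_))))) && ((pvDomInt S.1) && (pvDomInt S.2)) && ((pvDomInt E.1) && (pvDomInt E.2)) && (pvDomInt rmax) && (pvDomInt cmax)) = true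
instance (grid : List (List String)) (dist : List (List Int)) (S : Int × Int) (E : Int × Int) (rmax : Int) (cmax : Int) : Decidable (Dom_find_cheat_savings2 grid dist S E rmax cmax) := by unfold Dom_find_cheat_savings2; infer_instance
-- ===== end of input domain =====

-- B drops A's per-cell radius-shell offset enumeration (dc = radius - dr plus a 4-element
-- reflection dedup set) entirely: it collects all open cells with their distances once and
-- counts qualifying ordered pairs of open cells by their Manhattan distance; same return value.

-- ===== PORT A =====
def find_cheat_savings2 (grid : List (List String)) (dist : List (List Int)) (S : Int × Int) (E : Int × Int) (rmax : Int) (cmax : Int) : Int :=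
  (PySem.List.pyRange 0 rmax 1).foldl (fun count r =>
    (PySem.List.pyRange 0 cmax 1).foldl (fun count c =>
      if PySem.List.pyGetD (PySem.List.pyGetD grid r []) c "" = "#" then count
      else
        (PySem.List.pyRange 2 21 1).foldl (fun count radius =>
          (PySem.List.pyRange 0 (radius + 1) 1).foldl (fun count dr =>
            let dc := radius - dr
            (PySem.Set.ofList [(r + dr, c + dc), (r + dr, c - dc), (r - dr, c + dc), (r - dr, c - dc)]).foldl
              (fun count nrc =>
                if nrc.1 < 0 ∨ rmax ≤ nrc.1 ∨ nrc.2 < 0 ∨ cmax ≤ nrc.2 then count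
                else if PySem.List.pyGetD (PySem.List.pyGetD grid nrc.1 []) nrc.2 "" = "#" then count
                else if PySem.List.pyGetD (PySem.List.pyGetD dist r []) c 0 - PySem.List.pyGetD (PySem.List.pyGetD dist nrc.1 []) nrc.2 0 ≥ 100 + radius then count + 1
                else count)
              count)
            count)
          count)
      count)
    0

-- ===== PORT B =====
-- B-side helper: the list comprehension building the open cells (r, c, dist[r][c])
def pvCells (grid : List (List String)) (dist : List (List Int)) (rmax cmax : Int) : List (Int × Int × Int) :=
  (PySem.List.pyRange 0 rmax 1).flatMap (fun r =>
    (PySem.List.pyRange 0 cmax 1).filterMap (fun c =>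
      if PySem.List.pyGetD (PySem.List.pyGetD grid r []) c "" = "#" then none
      else some (r, c, PySem.List.pyGetD (PySem.List.pyGetD dist r []) c 0)))

def find_cheat_savings2_alt (grid : List (List String)) (dist : List (List Int)) (S : Int × Int) (E : Int × Int) (rmax : Int) (cmax : Int) : Int :=
  let cells := pvCells grid dist rmax cmax
  cells.foldl (fun count p =>
    cells.foldl (fun count q =>
      let radius := |p.1 - q.1| + |p.2.1 - q.2.1|
      if 2 ≤ radius ∧ radius ≤ 20 ∧ p.2.2 - q.2.2 ≥ 100 + radius then count + 1
      else count)
      count) 0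

-- ===== PRECONDITION & SPEC =====
-- Pre_ excludes inputs where grid or dist is smaller than the scanned rmax × cmax box:
-- there Python A in general raises IndexError (it happens to return 0 only when walls or
-- empty ranges cut every access short), and B raises on its dist accesses.
def Pre_find_cheat_savings2 (grid : List (List String)) (dist : List (List Int)) (S : Int × Int) (E : Int × Int) (rmax : Int) (cmax : Int) : Prop :=
  rmax ≤ 0 ∨ cmax ≤ 0 ∨
    (rmax ≤ (grid.length : Int) ∧ rmax ≤ (dist.length : Int) ∧
     (∀ row ∈ grid.take rmax.toNat, cmax ≤ (row.length : Int)) ∧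
     (∀ row ∈ dist.take rmax.toNat, cmax ≤ (row.length : Int)))
instance (grid : List (List String)) (dist : List (List Int)) (S : Int × Int) (E : Int × Int) (rmax : Int) (cmax : Int) : Decidable (Pre_find_cheat_savings2 grid dist S E rmax cmax) := by unfold Pre_find_cheat_savings2; infer_instance

def pvWitness_find_cheat_savings2 : List (List String) × List (List Int) × (Int × Int) × (Int × Int) × Int × Int :=
  ([[".", "."], [".", "#"]], [[0, 1], [3, 2]], (0, 0), (1, 0), 2, 2)

def Spec_find_cheat_savings2 (grid : List (List String)) (dist : List (List Int)) (S : Int × Int) (E : Int × Int) (rmax : Int) (cmax : Int) (out : Int) : Prop := out = find_cheat_savings2_alt grid dist S E rmax cmax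
instance (grid : List (List String)) (dist : List (List Int)) (S : Int × Int) (E : Int × Int) (rmax : Int) (cmax : Int) (out : Int) : Decidable (Spec_find_cheat_savings2 grid dist S E rmax cmax out) := by unfold Spec_find_cheat_savings2; infer_instance

-- ===== CLAIM (what is proved, stated in full; the proofs are below) =====
def Claim_equal_find_cheat_savings2 : Prop := ∀ (grid : List (List String)) (dist : List (List Int)) (S : Int × Int) (E : Int × Int) (rmax : Int) (cmax : Int), Dom_find_cheat_savings2 grid dist S E rmax cmax → Pre_find_cheat_savings2 grid dist S E rmax cmax → Spec_find_cheat_savings2 grid dist S E rmax cmax (find_cheat_savings2 grid dist S E rmax cmax)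

-- ===== LEMMAS AND PROOFS =====

theorem pvWitness_ok :
    Dom_find_cheat_savings2 (pvWitness_find_cheat_savings2.1) (pvWitness_find_cheat_savings2.2.1) (pvWitness_find_cheat_savings2.2.2.1) (pvWitness_find_cheat_savings2.2.2.2.1) (pvWitness_find_cheat_savings2.2.2.2.2.1) (pvWitness_find_cheat_savings2.2.2.2.2.2) ∧
    Pre_find_cheat_savings2 (pvWitness_find_cheat_savings2.1) (pvWitness_find_cheat_savings2.2.1) (pvWitness_find_cheat_savings2.2.2.1) (pvWitness_find_cheat_savings2.2.2.2.1) (pvWitness_find_cheat_savings2.2.2.2.2.1) (pvWitness_find_cheat_savings2.2.2.2.2.2) := by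
  decide

-- the contribution of one neighbour (nr, nc) at distance `radius` for the cell (r, c) in A
def pvInd (grid : List (List String)) (dist : List (List Int)) (rmax cmax r c nr nc radius : Int) : Int :=
  if nr < 0 ∨ rmax ≤ nr ∨ nc < 0 ∨ cmax ≤ nc then 0
  else if PySem.List.pyGetD (PySem.List.pyGetD grid nr []) nc "" = "#" then 0
  else if PySem.List.pyGetD (PySem.List.pyGetD dist r []) c 0 - PySem.List.pyGetD (PySem.List.pyGetD dist nr []) nc 0 ≥ 100 + radius then 1
  else 0

-- the contribution of an ordered pair of open cells in B
def pvIndB (p q : Int × Int × Int) : Int :=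
  if 2 ≤ |p.1 - q.1| + |p.2.1 - q.2.1| ∧ |p.1 - q.1| + |p.2.1 - q.2.1| ≤ 20 ∧
     p.2.2 - q.2.2 ≥ 100 + (|p.1 - q.1| + |p.2.1 - q.2.1|) then 1 else 0

-- Manhattan radius of a target point q seen from (r, c)
def pvRad (r c : Int) (q : Int × Int) : Int := |q.1 - r| + |q.2 - c|

-- A's contribution viewed as a function of the target point
def pvF (grid : List (List String)) (dist : List (List Int)) (rmax cmax r c : Int) (q : Int × Int) : Int :=
  if 2 ≤ pvRad r c q ∧ pvRad r c q ≤ 20 then pvInd grid dist rmax cmax r c q.1 q.2 (pvRad r c q) else 0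

-- A's offset/radius enumeration, relative to the cell
def pvOffA : List ((Int × Int) × Int) :=
  (PySem.List.pyRange 2 21 1).flatMap (fun radius =>
    (PySem.List.pyRange 0 (radius + 1) 1).flatMap (fun dr =>
      (PySem.Set.ofList [(dr, radius - dr), (dr, -(radius - dr)), (-dr, radius - dr), (-dr, -(radius - dr))]).map (fun p => (p, radius))))

def pvShift (r c : Int) (t : (Int × Int) × Int) : Int × Int := (r + t.1.1, c + t.1.2)

-- the full rmax × cmax box of target points
def pvBox (rmax cmax : Int) : List (Int × Int) :=
  (PySem.List.pyRange 0 rmax 1).flatMap (fun nr =>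
    (PySem.List.pyRange 0 cmax 1).map (fun nc => (nr, nc)))

-- a Python 'count += contribution' loop is init + the sum of the contributions
theorem pv_foldl_add {α : Type} (l : List α) (f : Int → α → Int) (g : α → Int)
    (h : ∀ a x, f a x = a + g x) (a : Int) : l.foldl f a = a + (l.map g).sum := by
  induction l generalizing a with
  | nil => simp
  | cons x xs ih => simp [h, ih, add_assoc]

theorem pv_sum_flatMap {α : Type} (l : List α) (f : α → List Int) :
    (l.flatMap f).sum = (l.map (fun a => (f a).sum)).sum := by
  induction l with
  | nil => rfl
  | cons x xs ih => simp [List.flatMap_cons, ih]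

theorem pv_sum_filterMap {α β : Type} (l : List α) (f : α → Option β) (g : β → Int) :
    ((l.filterMap f).map g).sum = (l.map (fun x => ((f x).map g).getD 0)).sum := by
  induction l with
  | nil => rfl
  | cons x xs ih => cases hx : f x <;> simp [List.filterMap_cons, hx, ih]

-- dropping the elements on which F vanishes does not change the sum
theorem pv_sum_filter {α : Type} (L : List α) (p : α → Bool) (F : α → Int)
    (h0 : ∀ x ∈ L, p x = false → F x = 0) :
    (L.map F).sum = ((L.filter p).map F).sum := by
  induction L with
  | nil => rfl
  | cons x xs ih =>
      have ih' := ih (fun y hy => h0 y (List.mem_cons_of_mem _ hy))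
      cases hx : p x with
      | false => simp [List.filter_cons, hx, ih', h0 x List.mem_cons_self hx]
      | true => simp [List.filter_cons, hx, ih']

-- Python set() dedup commutes with an injective relabelling of the elements
theorem pv_setadd_map {α β : Type} [BEq α] [LawfulBEq α] [BEq β] [LawfulBEq β]
    (f : α → β) (hf : Function.Injective f) (l : List α) : ∀ (s : List α),
    (l.map f).foldl PySem.Set.add (s.map f) = (l.foldl PySem.Set.add s).map f := by
  induction l with
  | nil => intro s; rfl
  | cons x xs ih =>
      intro s
      have hadd : PySem.Set.add (s.map f) (f x) = (PySem.Set.add s x).map f := by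
        rw [PySem.Set.add_eq_ite, PySem.Set.add_eq_ite]
        by_cases hx : x ∈ s
        · rw [if_pos hx, if_pos ((List.mem_map_of_injective hf).2 hx)]
        · rw [if_neg hx, if_neg (fun hmem => hx ((List.mem_map_of_injective hf).1 hmem)), List.map_append]
          rfl
      simp only [List.map_cons, List.foldl_cons, hadd, ih]

theorem pv_set_ofList_map {α β : Type} [BEq α] [LawfulBEq α] [BEq β] [LawfulBEq β]
    (f : α → β) (hf : Function.Injective f) (l : List α) :
    PySem.Set.ofList (l.map f) = (PySem.Set.ofList l).map f := by
  simpa [PySem.Set.ofList_eq_foldl] using pv_setadd_map f hf l []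

-- a flatMap is Nodup when each block is Nodup and a key read off the element names its block
theorem pv_nodup_flatMap_key {α β : Type} (l : List α) (f : α → List β) (key : β → α)
    (hl : l.Nodup) (hf : ∀ x ∈ l, (f x).Nodup) (hk : ∀ x ∈ l, ∀ b ∈ f x, key b = x) :
    (l.flatMap f).Nodup := by
  induction l with
  | nil => simp
  | cons x xs ih =>
      rw [List.flatMap_cons, List.nodup_append]
      refine ⟨hf x (by simp), ih hl.of_cons (fun y hy => hf y (by simp [hy])) (fun y hy => hk y (by simp [hy])), ?_⟩
      intro a ha b hb heq
      rcases List.mem_flatMap.1 hb with ⟨y, hy, hby⟩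
      have h1 : key a = x := hk x (by simp) a ha
      have h2 : key b = y := hk y (by simp [hy]) b hby
      have hxy : x ≠ y := by rintro rfl; exact (List.nodup_cons.1 hl).1 hy
      exact hxy (by rw [← h1, heq, h2])

-- membership: pvOffA enumerates exactly the diamond 2 ≤ |dx| + |dy| ≤ 20, once each
def pvDiamond (t : (Int × Int) × Int) : Prop :=
  t.2 = |t.1.1| + |t.1.2| ∧ 2 ≤ t.2 ∧ t.2 ≤ 20

theorem pv_mem_offA (t : (Int × Int) × Int) : t ∈ pvOffA ↔ pvDiamond t := by
  obtain ⟨⟨x, y⟩, rad⟩ := t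
  unfold pvOffA pvDiamond
  simp only [List.mem_flatMap, List.mem_map, PySem.Set.mem_ofList, PySem.List.mem_pyRange_one,
    List.mem_cons, List.not_mem_nil, or_false, Prod.mk.injEq]
  constructor
  · rintro ⟨radius, hrad, dr, hdr, p, hp, hpe, hre⟩
    obtain ⟨px, py⟩ := p
    simp only [Prod.mk.injEq] at hp hpe
    simp only [Int.abs_eq_natAbs]
    omega
  · rintro ⟨hrad, h2, h20⟩
    refine ⟨rad, ⟨?_, ?_⟩, |x|, ⟨?_, ?_⟩, (x, y), ?_, rfl, rfl⟩
    · omega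
    · omega
    · exact abs_nonneg x
    · simp only [Int.abs_eq_natAbs] at hrad ⊢; omega
    · simp only [Prod.mk.injEq]
      simp only [Int.abs_eq_natAbs] at hrad ⊢
      omega

theorem pv_nodup_offA : pvOffA.Nodup := by
  unfold pvOffA
  refine pv_nodup_flatMap_key _ _ (fun t => t.2) (PySem.List.nodup_pyRange_one 2 21) ?_ ?_
  · intro radius hrad
    refine pv_nodup_flatMap_key _ _ (fun t => |t.1.1|) (PySem.List.nodup_pyRange_one 0 (radius + 1)) ?_ ?_
    · intro dr hdr
      exact List.Nodup.map (fun p q h => by simpa using congrArg Prod.fst h) (PySem.Set.nodup_ofList _)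
    · intro dr hdr b hb
      rcases List.mem_map.1 hb with ⟨p, hp, rfl⟩
      rw [PySem.Set.mem_ofList] at hp
      have hdr' := (PySem.List.mem_pyRange_one).1 hdr
      simp only [List.mem_cons, List.not_mem_nil, or_false] at hp
      rcases hp with rfl | rfl | rfl | rfl <;>
        (simp only [Int.abs_eq_natAbs]; omega)
  · intro radius hrad b hb
    rcases List.mem_flatMap.1 hb with ⟨dr, hdr, hb⟩
    rcases List.mem_map.1 hb with ⟨p, hp, rfl⟩
    rfl

-- the shifted diamond: membership and Nodup
theorem pv_mem_SD (r c : Int) (q : Int × Int) :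
    q ∈ pvOffA.map (pvShift r c) ↔ (2 ≤ pvRad r c q ∧ pvRad r c q ≤ 20) := by
  simp only [List.mem_map]
  constructor
  · rintro ⟨t, ht, rfl⟩
    obtain ⟨h1, h2, h3⟩ := (pv_mem_offA t).1 ht
    unfold pvShift pvRad
    simp only [add_sub_cancel_left]
    omega
  · rintro ⟨h2, h20⟩
    refine ⟨((q.1 - r, q.2 - c), pvRad r c q), (pv_mem_offA _).2 ⟨rfl, h2, h20⟩, ?_⟩
    unfold pvShift
    simp only []
    exact Prod.ext (by ring) (by ring)

theorem pv_nodup_SD (r c : Int) : (pvOffA.map (pvShift r c)).Nodup := by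
  refine List.Nodup.map_on ?_ pv_nodup_offA
  intro t ht u hu heq
  obtain ⟨ht1, _, _⟩ := (pv_mem_offA t).1 ht
  obtain ⟨hu1, _, _⟩ := (pv_mem_offA u).1 hu
  obtain ⟨⟨tx, ty⟩, tr⟩ := t
  obtain ⟨⟨ux, uy⟩, ur⟩ := u
  unfold pvShift at heq
  simp only [Prod.mk.injEq] at heq ⊢
  simp only at ht1 hu1
  have hx : tx = ux := by omega
  have hy : ty = uy := by omega
  subst hx; subst hy
  exact ⟨⟨rfl, rfl⟩, by rw [ht1, hu1]⟩

-- the box: membership and Nodup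
theorem pv_mem_box (rmax cmax : Int) (q : Int × Int) :
    q ∈ pvBox rmax cmax ↔ (0 ≤ q.1 ∧ q.1 < rmax ∧ 0 ≤ q.2 ∧ q.2 < cmax) := by
  obtain ⟨a, b⟩ := q
  unfold pvBox
  simp only [List.mem_flatMap, List.mem_map, PySem.List.mem_pyRange_one, Prod.mk.injEq]
  constructor
  · rintro ⟨nr, hnr, nc, hnc, rfl, rfl⟩; exact ⟨hnr.1, hnr.2, hnc.1, hnc.2⟩
  · rintro ⟨h1, h2, h3, h4⟩; exact ⟨a, ⟨h1, h2⟩, b, ⟨h3, h4⟩, rfl, rfl⟩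

theorem pv_nodup_box (rmax cmax : Int) : (pvBox rmax cmax).Nodup := by
  unfold pvBox
  refine pv_nodup_flatMap_key _ _ (fun q => q.1) (PySem.List.nodup_pyRange_one 0 rmax) ?_ ?_
  · intro nr _
    exact List.Nodup.map (fun a b h => by simpa using congrArg Prod.snd h) (PySem.List.nodup_pyRange_one 0 cmax)
  · intro nr _ b hb
    rcases List.mem_map.1 hb with ⟨nc, _, rfl⟩
    rfl

-- pvF vanishes off the box, and off the diamond
theorem pv_F_zero_outside_box (grid : List (List String)) (dist : List (List Int)) (rmax cmax r c : Int)
    (q : Int × Int) (h : ¬ (0 ≤ q.1 ∧ q.1 < rmax ∧ 0 ≤ q.2 ∧ q.2 < cmax)) :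
    pvF grid dist rmax cmax r c q = 0 := by
  unfold pvF pvInd
  split_ifs <;> (try rfl) <;> omega

theorem pv_F_zero_outside_diamond (grid : List (List String)) (dist : List (List Int)) (rmax cmax r c : Int)
    (q : Int × Int) (h : ¬ (2 ≤ pvRad r c q ∧ pvRad r c q ≤ 20)) :
    pvF grid dist rmax cmax r c q = 0 := by
  unfold pvF
  rw [if_neg h]

-- per open cell: A's offset scan equals B's scan over all open cells
theorem pv_cell_bridge (grid : List (List String)) (dist : List (List Int)) (rmax cmax r c : Int) :
    (pvOffA.map (fun t => pvInd grid dist rmax cmax r c (r + t.1.1) (c + t.1.2) t.2)).sum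
      = ((pvCells grid dist rmax cmax).map
          (pvIndB (r, c, PySem.List.pyGetD (PySem.List.pyGetD dist r []) c 0))).sum := by
  -- step 1: rewrite A's sum as a sum of pvF over the shifted diamond
  have h1 : (pvOffA.map (fun t => pvInd grid dist rmax cmax r c (r + t.1.1) (c + t.1.2) t.2)).sum
      = ((pvOffA.map (pvShift r c)).map (pvF grid dist rmax cmax r c)).sum := by
    rw [List.map_map]
    refine congrArg List.sum (List.map_congr_left fun t ht => ?_)
    obtain ⟨h1, h2, h3⟩ := (pv_mem_offA t).1 ht
    have hr : pvRad r c (pvShift r c t) = t.2 := by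
      unfold pvRad pvShift
      simp only [add_sub_cancel_left]
      omega
    simp only [Function.comp_apply, pvF, hr]
    rw [if_pos ⟨h2, h3⟩]
    rfl
  -- step 2: the shifted diamond restricted to the box is a permutation of the box restricted to the diamond
  have h2 : ((pvOffA.map (pvShift r c)).map (pvF grid dist rmax cmax r c)).sum
      = ((pvBox rmax cmax).map (pvF grid dist rmax cmax r c)).sum := by
    have hfilt1 := pv_sum_filter (pvOffA.map (pvShift r c))
      (fun q => decide (0 ≤ q.1 ∧ q.1 < rmax ∧ 0 ≤ q.2 ∧ q.2 < cmax))
      (pvF grid dist rmax cmax r c)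
      (fun q _ hq => pv_F_zero_outside_box grid dist rmax cmax r c q (by simpa using hq))
    have hfilt2 := pv_sum_filter (pvBox rmax cmax)
      (fun q => decide (2 ≤ pvRad r c q ∧ pvRad r c q ≤ 20))
      (pvF grid dist rmax cmax r c)
      (fun q _ hq => pv_F_zero_outside_diamond grid dist rmax cmax r c q (by simpa using hq))
    rw [hfilt1, hfilt2]
    refine (List.Perm.map _ ?_).sum_eq
    refine (List.perm_ext_iff_of_nodup (List.Nodup.filter _ (pv_nodup_SD r c))
      (List.Nodup.filter _ (pv_nodup_box rmax cmax))).2 (fun q => ?_)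
    simp only [List.mem_filter, pv_mem_SD, pv_mem_box, decide_eq_true_eq]
    tauto
  -- step 3: the box sum is B's sum over the open-cell list
  have h3 : ((pvBox rmax cmax).map (pvF grid dist rmax cmax r c)).sum
      = ((pvCells grid dist rmax cmax).map
          (pvIndB (r, c, PySem.List.pyGetD (PySem.List.pyGetD dist r []) c 0))).sum := by
    unfold pvBox pvCells
    rw [List.map_flatMap, pv_sum_flatMap, List.map_flatMap, pv_sum_flatMap]
    refine congrArg List.sum (List.map_congr_left fun nr hnr => ?_)
    rw [List.map_map, pv_sum_filterMap]
    refine congrArg List.sum (List.map_congr_left fun nc hnc => ?_)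
    have hb1 := (PySem.List.mem_pyRange_one).1 hnr
    have hb2 := (PySem.List.mem_pyRange_one).1 hnc
    by_cases hw : PySem.List.pyGetD (PySem.List.pyGetD grid nr []) nc "" = "#"
    · simp only [Function.comp_apply, hw, if_pos, Option.map_none, Option.getD_none]
      unfold pvF pvInd pvRad
      split_ifs <;> (try rfl) <;> omega
    · simp only [Function.comp_apply, if_neg hw, Option.map_some, Option.getD_some]
      unfold pvF pvInd pvRad pvIndB
      simp only []
      rw [abs_sub_comm r nr, abs_sub_comm c nc]
      split_ifs <;> (try rfl) <;> omega
  rw [h1, h2, h3]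

-- A's per-cell scan is the sum of the indicator over pvOffA shifted to the cell
theorem pv_cellA (grid : List (List String)) (dist : List (List Int)) (rmax cmax r c count : Int) :
    (PySem.List.pyRange 2 21 1).foldl (fun count radius =>
      (PySem.List.pyRange 0 (radius + 1) 1).foldl (fun count dr =>
        let dc := radius - dr
        (PySem.Set.ofList [(r + dr, c + dc), (r + dr, c - dc), (r - dr, c + dc), (r - dr, c - dc)]).foldl
          (fun count nrc =>
            if nrc.1 < 0 ∨ rmax ≤ nrc.1 ∨ nrc.2 < 0 ∨ cmax ≤ nrc.2 then count
            else if PySem.List.pyGetD (PySem.List.pyGetD grid nrc.1 []) nrc.2 "" = "#" then count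
            else if PySem.List.pyGetD (PySem.List.pyGetD dist r []) c 0 - PySem.List.pyGetD (PySem.List.pyGetD dist nrc.1 []) nrc.2 0 ≥ 100 + radius then count + 1
            else count)
          count)
        count)
      count
    = count + (pvOffA.map (fun t => pvInd grid dist rmax cmax r c (r + t.1.1) (c + t.1.2) t.2)).sum := by
  have hinj : Function.Injective (fun p : Int × Int => (r + p.1, c + p.2)) := by
    intro p q h
    simp only [Prod.mk.injEq] at h
    obtain ⟨h1, h2⟩ := h
    exact Prod.ext (by omega) (by omega)
  have hstep : ∀ (radius a : Int) (nrc : Int × Int),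
      (if nrc.1 < 0 ∨ rmax ≤ nrc.1 ∨ nrc.2 < 0 ∨ cmax ≤ nrc.2 then a
       else if PySem.List.pyGetD (PySem.List.pyGetD grid nrc.1 []) nrc.2 "" = "#" then a
       else if PySem.List.pyGetD (PySem.List.pyGetD dist r []) c 0 - PySem.List.pyGetD (PySem.List.pyGetD dist nrc.1 []) nrc.2 0 ≥ 100 + radius then a + 1
       else a)
      = a + pvInd grid dist rmax cmax r c nrc.1 nrc.2 radius := by
    intro radius a nrc
    unfold pvInd
    split_ifs <;> omega
  have hinner : ∀ (radius dr a : Int),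
      (PySem.Set.ofList [(r + dr, c + (radius - dr)), (r + dr, c - (radius - dr)), (r - dr, c + (radius - dr)), (r - dr, c - (radius - dr))]).foldl
        (fun a nrc =>
          if nrc.1 < 0 ∨ rmax ≤ nrc.1 ∨ nrc.2 < 0 ∨ cmax ≤ nrc.2 then a
          else if PySem.List.pyGetD (PySem.List.pyGetD grid nrc.1 []) nrc.2 "" = "#" then a
          else if PySem.List.pyGetD (PySem.List.pyGetD dist r []) c 0 - PySem.List.pyGetD (PySem.List.pyGetD dist nrc.1 []) nrc.2 0 ≥ 100 + radius then a + 1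
          else a)
        a
      = a + ((PySem.Set.ofList [(r + dr, c + (radius - dr)), (r + dr, c - (radius - dr)), (r - dr, c + (radius - dr)), (r - dr, c - (radius - dr))]).map
          (fun nrc => pvInd grid dist rmax cmax r c nrc.1 nrc.2 radius)).sum :=
    fun radius dr a => pv_foldl_add _ _ _ (fun a nrc => hstep radius a nrc) a
  have hmid : ∀ (radius a : Int),
      (PySem.List.pyRange 0 (radius + 1) 1).foldl (fun a dr =>
        let dc := radius - dr
        (PySem.Set.ofList [(r + dr, c + dc), (r + dr, c - dc), (r - dr, c + dc), (r - dr, c - dc)]).foldl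
          (fun a nrc =>
            if nrc.1 < 0 ∨ rmax ≤ nrc.1 ∨ nrc.2 < 0 ∨ cmax ≤ nrc.2 then a
            else if PySem.List.pyGetD (PySem.List.pyGetD grid nrc.1 []) nrc.2 "" = "#" then a
            else if PySem.List.pyGetD (PySem.List.pyGetD dist r []) c 0 - PySem.List.pyGetD (PySem.List.pyGetD dist nrc.1 []) nrc.2 0 ≥ 100 + radius then a + 1
            else a)
          a)
        a
      = a + ((PySem.List.pyRange 0 (radius + 1) 1).map (fun dr =>
          ((PySem.Set.ofList [(r + dr, c + (radius - dr)), (r + dr, c - (radius - dr)), (r - dr, c + (radius - dr)), (r - dr, c - (radius - dr))]).map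
            (fun nrc => pvInd grid dist rmax cmax r c nrc.1 nrc.2 radius)).sum)).sum :=
    fun radius a => pv_foldl_add _ _ _ (fun a dr => hinner radius dr a) a
  rw [pv_foldl_add _ _ _ (fun a radius => hmid radius a) count]
  congr 1
  unfold pvOffA
  rw [List.map_flatMap, pv_sum_flatMap]
  refine congrArg List.sum (List.map_congr_left fun radius hrad => ?_)
  rw [List.map_flatMap, pv_sum_flatMap]
  refine congrArg List.sum (List.map_congr_left fun dr hdr => ?_)
  have habs : [((r + dr : Int), c + (radius - dr)), (r + dr, c - (radius - dr)), (r - dr, c + (radius - dr)), (r - dr, c - (radius - dr))]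
      = [((dr : Int), radius - dr), (dr, -(radius - dr)), (-dr, radius - dr), (-dr, -(radius - dr))].map (fun p => (r + p.1, c + p.2)) := by
    simp [sub_eq_add_neg]
  rw [habs, pv_set_ofList_map _ hinj, List.map_map, List.map_map]
  rfl

-- B's double fold is the double sum of pvIndB over pvCells
theorem pv_B_sum (grid : List (List String)) (dist : List (List Int)) (rmax cmax : Int) :
    (pvCells grid dist rmax cmax).foldl (fun count p =>
      (pvCells grid dist rmax cmax).foldl (fun count q =>
        let radius := |p.1 - q.1| + |p.2.1 - q.2.1|
        if 2 ≤ radius ∧ radius ≤ 20 ∧ p.2.2 - q.2.2 ≥ 100 + radius then count + 1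
        else count)
        count) 0
    = ((pvCells grid dist rmax cmax).map (fun p => ((pvCells grid dist rmax cmax).map (pvIndB p)).sum)).sum := by
  rw [pv_foldl_add _ _ (fun p => ((pvCells grid dist rmax cmax).map (pvIndB p)).sum) ?_ 0]
  · simp
  · intro a p
    exact pv_foldl_add _ _ (pvIndB p) (fun a q => by dsimp only; unfold pvIndB; split_ifs <;> omega) a

-- ===== VERDICT (by name: the statement is the Claim_ definition above) =====
set_option maxHeartbeats 1000000 in
theorem find_cheat_savings2_spec : Claim_equal_find_cheat_savings2 := by
  intro grid dist S E rmax cmax _ _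
  unfold Spec_find_cheat_savings2 find_cheat_savings2 find_cheat_savings2_alt
  rw [pv_B_sum]
  -- A side: flatten the two outer loops into a sum
  have hA : ∀ (count r : Int),
      (PySem.List.pyRange 0 cmax 1).foldl (fun count c =>
        if PySem.List.pyGetD (PySem.List.pyGetD grid r []) c "" = "#" then count
        else
          (PySem.List.pyRange 2 21 1).foldl (fun count radius =>
            (PySem.List.pyRange 0 (radius + 1) 1).foldl (fun count dr =>
              let dc := radius - dr
              (PySem.Set.ofList [(r + dr, c + dc), (r + dr, c - dc), (r - dr, c + dc), (r - dr, c - dc)]).foldl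
                (fun count nrc =>
                  if nrc.1 < 0 ∨ rmax ≤ nrc.1 ∨ nrc.2 < 0 ∨ cmax ≤ nrc.2 then count
                  else if PySem.List.pyGetD (PySem.List.pyGetD grid nrc.1 []) nrc.2 "" = "#" then count
                  else if PySem.List.pyGetD (PySem.List.pyGetD dist r []) c 0 - PySem.List.pyGetD (PySem.List.pyGetD dist nrc.1 []) nrc.2 0 ≥ 100 + radius then count + 1
                  else count)
                count)
              count)
            count)
        count
      = count + ((PySem.List.pyRange 0 cmax 1).map (fun c =>
          if PySem.List.pyGetD (PySem.List.pyGetD grid r []) c "" = "#" then 0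
          else (pvOffA.map (fun t => pvInd grid dist rmax cmax r c (r + t.1.1) (c + t.1.2) t.2)).sum)).sum := by
    intro count r
    refine pv_foldl_add _ _ _ (fun a c => ?_) count
    by_cases hw : PySem.List.pyGetD (PySem.List.pyGetD grid r []) c "" = "#"
    · simp only [if_pos hw]; omega
    · simp only [if_neg hw]
      exact pv_cellA grid dist rmax cmax r c a
  rw [pv_foldl_add _ _ _ (fun a r => hA a r) 0]
  rw [zero_add]
  -- B side: expand the open-cell list into the double range sum
  unfold pvCells
  rw [List.map_flatMap, pv_sum_flatMap]
  refine congrArg List.sum (List.map_congr_left fun r hr => ?_)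
  rw [pv_sum_filterMap]
  refine congrArg List.sum (List.map_congr_left fun c hc => ?_)
  by_cases hw : PySem.List.pyGetD (PySem.List.pyGetD grid r []) c "" = "#"
  · simp [hw]
  · simp only [if_neg hw, if_pos, Option.map_some, Option.getD_some]
    exact pv_cell_bridge grid dist rmax cmax r c
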